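-- pv_equiv track=rewrite | github.com/HanaBouikni/Cryptosyst-me | Examen de Kasiski/kasiski.py | analyze_factors
-- ===== SOURCE A (Python) =====
-- def analyze_factors(distances):
--     """
--     Analyse des facteurs pour Kasiski
--     """
--     factor_count = {}
--
--     for distance in distances:
--         # Trouver tous les facteurs de cette distance
--         for factor in range(2, distance + 1):
--             if distance % factor == 0:
--                 factor_count[factor] = factor_count.get(factor, 0) + 1
--
--     # Convertir en tableau et trier par fréquence
--     return sorted(
--         [[int(factor), count] for factor, count in factor_count.items()],
--         key=lambda x: x[1],
--         reverse=True
--     )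
-- ===== SOURCE B (Python) =====
-- def analyze_factors(distances):
--     factor_count = {}
--     for distance in distances:
--         # collect divisors >= 2 by trial division up to sqrt(distance)
--         divs = set()
--         i = 1
--         while i * i <= distance:
--             if distance % i == 0:
--                 if i >= 2:
--                     divs.add(i)
--                 if distance // i >= 2:
--                     divs.add(distance // i)
--             i += 1
--         for factor in sorted(divs):
--             factor_count[factor] = factor_count.get(factor, 0) + 1
--     return sorted(
--         [[factor, count] for factor, count in factor_count.items()],
--         key=lambda x: x[1],
--         reverse=True
--     )
-- ===== Notes on version B (the rewrite author's own statement) =====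
-- stated objective: faster
-- what changed: Replaces the O(distance) scan of every candidate factor 2..distance with trial division up to sqrt(distance) collecting divisor pairs into a set, then inserting the divisors in ascending order so the counter's insertion order (and hence the stable frequency sort) is preserved.
import Mathlib
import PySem

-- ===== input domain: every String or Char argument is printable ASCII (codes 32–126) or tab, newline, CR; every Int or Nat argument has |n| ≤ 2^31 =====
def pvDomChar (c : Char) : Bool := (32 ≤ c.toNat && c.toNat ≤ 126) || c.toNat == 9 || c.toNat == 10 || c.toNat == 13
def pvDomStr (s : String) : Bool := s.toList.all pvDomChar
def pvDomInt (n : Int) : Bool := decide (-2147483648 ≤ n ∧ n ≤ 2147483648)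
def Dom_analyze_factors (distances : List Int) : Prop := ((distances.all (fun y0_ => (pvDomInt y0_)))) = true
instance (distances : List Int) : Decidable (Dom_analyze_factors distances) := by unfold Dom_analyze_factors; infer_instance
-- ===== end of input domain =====

-- B replaces A's scan of all candidate factors 2..distance with trial division up to
-- sqrt(distance) collecting divisor pairs into a set, inserted in ascending order (faster).


-- ===== PORT A =====
def analyze_factors (distances : List Int) : List (List Int) :=
  let factor_count : PySem.Dict Int Int :=
    distances.foldl (fun fc distance =>
      (PySem.List.pyRange 2 (distance + 1) 1).foldl (fun fc factor =>
        if PySem.Int.mod distance factor == 0 then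
          fc.insert factor (fc.getD factor 0 + 1)
        else fc) fc)
      PySem.Dict.empty
  PySem.List.sorted (factor_count.items.map (fun p => [p.1, p.2]))
    (fun x => PySem.List.pyGetD x 1 0) true

-- ===== PORT B =====
-- B's while loop: 'i = 1; while i * i <= d: if d % i == 0: add i and d // i when ≥ 2; i += 1'
def pvDivLoop (d i : Int) (s : PySem.Set Int) : PySem.Set Int :=
  if h : i * i ≤ d then
    let s1 :=
      if PySem.Int.mod d i == 0 then
        let s' := if 2 ≤ i then PySem.Set.add s i else s
        if 2 ≤ PySem.Int.floordiv d i then PySem.Set.add s' (PySem.Int.floordiv d i) else s'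
      else s
    pvDivLoop d (i + 1) s1
  else s
termination_by (d + 1 - i).toNat
decreasing_by
  have hii : i ≤ i * i := by nlinarith [mul_self_nonneg (i - 1), mul_self_nonneg i]
  omega

def analyze_factors_alt (distances : List Int) : List (List Int) :=
  let factor_count : PySem.Dict Int Int :=
    distances.foldl (fun fc distance =>
      (PySem.List.sorted (pvDivLoop distance 1 PySem.Set.empty) (fun x => x) false).foldl
        (fun fc factor => fc.insert factor (fc.getD factor 0 + 1)) fc)
      PySem.Dict.empty
  PySem.List.sorted (factor_count.items.map (fun p => [p.1, p.2]))
    (fun x => PySem.List.pyGetD x 1 0) true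

-- ===== PRECONDITION & SPEC =====
def Spec_analyze_factors (distances : List Int) (out : List (List Int)) : Prop := out = analyze_factors_alt distances
instance (distances : List Int) (out : List (List Int)) : Decidable (Spec_analyze_factors distances out) := by unfold Spec_analyze_factors; infer_instance

-- ===== CLAIM (what is proved, stated in full; the proofs are below) =====
def Claim_equal_analyze_factors : Prop := ∀ (distances : List Int), Dom_analyze_factors distances → Spec_analyze_factors distances (analyze_factors distances)

-- ===== LEMMAS AND PROOFS =====

-- membership in B's divisor loop (for any start i ≥ 1)
set_option maxHeartbeats 800000 in
lemma mem_pvDivLoop (d : Int) : ∀ (i : Int) (s : PySem.Set Int) (k : Int), 1 ≤ i →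
    (k ∈ pvDivLoop d i s ↔ k ∈ s ∨ ∃ j, i ≤ j ∧ j * j ≤ d ∧ PySem.Int.mod d j = 0 ∧
      ((k = j ∧ 2 ≤ j) ∨ (k = PySem.Int.floordiv d j ∧ 2 ≤ PySem.Int.floordiv d j))) := by
  intro i s k
  fun_induction pvDivLoop d i s with
  | case1 i s h s1 ih =>
    intro hi
    rw [ih (by omega)]
    have hsplit : ∀ Q : Int → Prop, (∃ j, i ≤ j ∧ Q j) ↔ Q i ∨ (∃ j, i + 1 ≤ j ∧ Q j) := by
      intro Q
      constructor
      · rintro ⟨j, hj, hq⟩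
        rcases eq_or_lt_of_le hj with rfl | hlt
        · exact Or.inl hq
        · exact Or.inr ⟨j, by omega, hq⟩
      · rintro (hq | ⟨j, hj, hq⟩)
        · exact ⟨i, le_refl _, hq⟩
        · exact ⟨j, by omega, hq⟩
    rw [hsplit]
    simp only [s1]
    by_cases hm : PySem.Int.mod d i == 0
    · have hm' : PySem.Int.mod d i = 0 := by simpa using hm
      by_cases h2 : 2 ≤ i <;> by_cases h3 : 2 ≤ PySem.Int.floordiv d i <;>
        simp [h2, h3, hm', h, PySem.Set.mem_add, or_assoc]
    · have hm' : ¬ PySem.Int.mod d i = 0 := by simpa using hm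
      simp [hm, hm', h]
  | case2 i s h =>
    intro hi
    constructor
    · intro hs; exact Or.inl hs
    · rintro (hs | ⟨j, hj, hjj, _⟩)
      · exact hs
      · exfalso
        have : i * i ≤ j * j := by nlinarith
        exact h (le_trans this hjj)

lemma nodup_pvDivLoop (d : Int) : ∀ (i : Int) (s : PySem.Set Int), s.Nodup → (pvDivLoop d i s).Nodup := by
  intro i s
  fun_induction pvDivLoop d i s with
  | case1 i s h s1 ih =>
    intro hs
    apply ih
    simp only [s1]
    split_ifs <;> first
      | exact hs
      | exact PySem.Set.nodup_add _ _ hs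
      | exact PySem.Set.nodup_add _ _ (PySem.Set.nodup_add _ _ hs)
  | case2 i s h => exact id

-- the sqrt-bounded pair search finds exactly the divisors 2..d
lemma divisors_char (d k : Int) :
    (∃ j, 1 ≤ j ∧ j * j ≤ d ∧ PySem.Int.mod d j = 0 ∧
      ((k = j ∧ 2 ≤ j) ∨ (k = PySem.Int.floordiv d j ∧ 2 ≤ PySem.Int.floordiv d j)))
    ↔ (2 ≤ k ∧ k ≤ d ∧ PySem.Int.mod d k = 0) := by
  constructor
  · rintro ⟨j, hj1, hjj, hmod, hk⟩
    have hjd : j ∣ d := (PySem.Int.mod_eq_zero_iff_dvd d j).mp hmod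
    have hfd : PySem.Int.floordiv d j = d / j := PySem.Int.floordiv_eq_ediv_of_pos (by omega)
    rcases hk with ⟨rfl, h2⟩ | ⟨rfl, h2⟩
    · refine ⟨h2, by nlinarith, hmod⟩
    · rw [hfd] at h2 ⊢
      obtain ⟨m, rfl⟩ := hjd
      have hjne : j ≠ 0 := by omega
      rw [Int.mul_ediv_cancel_left m hjne] at h2 ⊢
      refine ⟨h2, by nlinarith, ?_⟩
      rw [PySem.Int.mod_eq_zero_iff_dvd]
      exact ⟨j, by ring⟩
  · rintro ⟨h2, hkd, hmod⟩
    have hkdvd : k ∣ d := (PySem.Int.mod_eq_zero_iff_dvd d k).mp hmod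
    obtain ⟨m, rfl⟩ := hkdvd
    have hm1 : 1 ≤ m := by nlinarith
    by_cases hsq : k * k ≤ k * m
    · exact ⟨k, by omega, hsq, by rw [PySem.Int.mod_eq_zero_iff_dvd]; exact ⟨m, rfl⟩,
        Or.inl ⟨rfl, h2⟩⟩
    · refine ⟨m, hm1, by nlinarith, by rw [PySem.Int.mod_eq_zero_iff_dvd]; exact ⟨k, by ring⟩, ?_⟩
      right
      have hfd : PySem.Int.floordiv (k * m) m = k * m / m := PySem.Int.floordiv_eq_ediv_of_pos (by omega)
      rw [hfd, Int.mul_ediv_cancel k (by omega)]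
      exact ⟨rfl, h2⟩

-- B's ascending divisor list is exactly A's filtered candidate range
lemma sorted_divisors_eq (d : Int) :
    PySem.List.sorted (pvDivLoop d 1 PySem.Set.empty) (fun x => x) false
      = (PySem.List.pyRange 2 (d + 1) 1).filter (fun f => PySem.Int.mod d f == 0) := by
  apply PySem.List.sorted_id_eq_of_perm_of_pairwise
  · apply (List.perm_ext_iff_of_nodup ?_ ?_).mpr
    · intro a
      rw [List.mem_filter, PySem.List.mem_pyRange_one,
        mem_pvDivLoop d 1 PySem.Set.empty a (by omega)]
      have := divisors_char d a
      constructor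
      · rintro ⟨⟨h1, h2⟩, h3⟩
        exact Or.inr (this.mpr ⟨h1, by omega, by simpa using h3⟩)
      · rintro (hs | hex)
        · cases hs
        · obtain ⟨h1, h2, h3⟩ := this.mp hex
          exact ⟨⟨h1, by omega⟩, by simpa using h3⟩
    · exact (PySem.List.nodup_pyRange_one 2 (d+1)).filter _
    · exact nodup_pvDivLoop d 1 PySem.Set.empty List.nodup_nil
  · exact (PySem.List.pairwise_lt_pyRange_one 2 (d+1)).filter _ |>.imp (fun h => le_of_lt h)

-- ===== VERDICT (by name: the statement is the Claim_ definition above) =====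
theorem analyze_factors_spec : Claim_equal_analyze_factors := by
  intro distances _
  unfold Spec_analyze_factors analyze_factors analyze_factors_alt
  have hfun : (fun (fc : PySem.Dict Int Int) (distance : Int) =>
      (PySem.List.pyRange 2 (distance + 1) 1).foldl (fun fc factor =>
        if PySem.Int.mod distance factor == 0 then fc.insert factor (fc.getD factor 0 + 1) else fc) fc)
    = (fun (fc : PySem.Dict Int Int) (distance : Int) =>
      (PySem.List.sorted (pvDivLoop distance 1 PySem.Set.empty) (fun x => x) false).foldl
        (fun fc factor => fc.insert factor (fc.getD factor 0 + 1)) fc) := by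
    funext fc distance
    rw [sorted_divisors_eq, List.foldl_filter]
  rw [hfun]
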